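-- pv_equiv track=rewrite | github.com/FRC-7636/Robomania-Bot-Web | Members/views.py | sort_groups
-- ===== SOURCE A (Python) =====
-- def sort_groups(groups: list[str]) -> dict[str, list[str]]:
--     dept_groups, identity_groups = [], []
--     for group in groups:
--         if group.startswith("(D)"):
--             dept_groups.append(group)
--         elif group.startswith("(I)"):
--             identity_groups.append(group)
--     dept_groups.sort()
--     identity_groups.sort()
--     return {
--         "dept_groups": dept_groups,
--         "identity_groups": identity_groups,
--     }
-- ===== SOURCE B (Python) =====
-- def sort_groups(groups: list[str]) -> dict[str, list[str]]:
--     s = sorted(groups)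
--     return {
--         "dept_groups": [g for g in s if g.startswith("(D)")],
--         "identity_groups": [g for g in s if g.startswith("(I)")],
--     }
-- ===== Notes on version B (the rewrite author's own statement) =====
-- stated objective: idiomatic
-- what changed: B sorts the whole list once and then partitions it with two filtering comprehensions (sort-then-partition), instead of A's partition-into-two-lists loop followed by two separate in-place sorts.
import Mathlib
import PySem

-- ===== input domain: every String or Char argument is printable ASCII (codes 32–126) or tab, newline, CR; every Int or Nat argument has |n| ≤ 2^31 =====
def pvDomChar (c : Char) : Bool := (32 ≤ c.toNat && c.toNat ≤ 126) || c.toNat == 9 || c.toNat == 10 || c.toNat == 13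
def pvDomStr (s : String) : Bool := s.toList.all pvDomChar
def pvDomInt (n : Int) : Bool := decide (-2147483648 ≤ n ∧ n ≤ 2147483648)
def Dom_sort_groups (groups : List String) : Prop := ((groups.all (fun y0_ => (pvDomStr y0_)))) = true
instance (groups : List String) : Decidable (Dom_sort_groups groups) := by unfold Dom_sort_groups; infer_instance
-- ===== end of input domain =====

-- B sorts the whole list once and then partitions it with two filtering passes,
-- instead of A's partition loop followed by two separate sorts (objective: idiomatic).

-- ===== PORT A =====
def sort_groups (groups : List String) : List (String × List String) :=
  let st := groups.foldl (fun (st : List String × List String) group =>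
      if PySem.Str.startswith group "(D)" then (st.1 ++ [group], st.2)
      else if PySem.Str.startswith group "(I)" then (st.1, st.2 ++ [group])
      else st) ([], [])
  [("dept_groups", PySem.List.sorted st.1 (fun g => g)),
   ("identity_groups", PySem.List.sorted st.2 (fun g => g))]

-- ===== PORT B =====
def sort_groups_alt (groups : List String) : List (String × List String) :=
  let s := PySem.List.sorted groups (fun g => g)
  [("dept_groups", s.filter (fun g => PySem.Str.startswith g "(D)")),
   ("identity_groups", s.filter (fun g => PySem.Str.startswith g "(I)"))]

-- ===== PRECONDITION & SPEC =====
def Spec_sort_groups (groups : List String) (out : List (String × List String)) : Prop := out = sort_groups_alt groups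
instance (groups : List String) (out : List (String × List String)) : Decidable (Spec_sort_groups groups out) := by unfold Spec_sort_groups; infer_instance

-- ===== CLAIM (what is proved, stated in full; the proofs are below) =====
def Claim_equal_sort_groups : Prop := ∀ (groups : List String), Dom_sort_groups groups → Spec_sort_groups groups (sort_groups groups)

-- ===== LEMMAS AND PROOFS =====

-- insertion comparator for Python's plain (identity-key) sort on strings
def pvBef (a b : String) : Bool := decide (a < b)

-- a string cannot start with both "(D)" and "(I)"
theorem pv_not_both (g : String) :
    PySem.Str.startswith g "(D)" = true → PySem.Str.startswith g "(I)" = true → False := by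
  intro h1 h2
  rw [PySem.Str.startswith_eq, PySem.Chars.startswith_iff] at h1 h2
  obtain ⟨t1, e1⟩ := h1
  obtain ⟨t2, e2⟩ := h2
  have : ('(' :: 'D' :: ')' :: t1 : List Char) = '(' :: 'I' :: ')' :: t2 := by
    simpa using e1.trans e2.symm
  simp at this

-- the elif-filter equals the plain "(I)" filter
theorem pv_filter_elif (xs : List String) :
    xs.filter (fun g => !PySem.Str.startswith g "(D)" && PySem.Str.startswith g "(I)")
      = xs.filter (fun g => PySem.Str.startswith g "(I)") := by
  apply List.filter_congr
  intro g _
  cases hD : PySem.Str.startswith g "(D)" with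
  | false => simp
  | true =>
    cases hI : PySem.Str.startswith g "(I)" with
    | false => rfl
    | true => exact (pv_not_both g hD hI).elim

-- A's loop accumulates exactly the two filters
theorem pv_loopA (xs : List String) (d i : List String) :
    xs.foldl (fun (st : List String × List String) group =>
      if PySem.Str.startswith group "(D)" then (st.1 ++ [group], st.2)
      else if PySem.Str.startswith group "(I)" then (st.1, st.2 ++ [group])
      else st) (d, i)
    = (d ++ xs.filter (fun g => PySem.Str.startswith g "(D)"),
       i ++ xs.filter (fun g => !PySem.Str.startswith g "(D)" && PySem.Str.startswith g "(I)")) := by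
  induction xs generalizing d i with
  | nil => simp
  | cons x xs ih =>
    by_cases hD : PySem.Str.startswith x "(D)" = true
    · simp only [List.foldl_cons, List.filter_cons, hD, Bool.not_true, Bool.false_and,
        Bool.false_eq_true, reduceIte]
      rw [ih]
      simp
    · rw [Bool.not_eq_true] at hD
      by_cases hI : PySem.Str.startswith x "(I)" = true
      · simp only [List.foldl_cons, List.filter_cons, hD, hI, Bool.not_false, Bool.true_and,
          Bool.false_eq_true, reduceIte]
        rw [ih]
        simp
      · rw [Bool.not_eq_true] at hI
        simp only [List.foldl_cons, List.filter_cons, hD, hI, Bool.not_false, Bool.true_and,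
          Bool.false_eq_true, reduceIte]
        rw [ih]

-- inserting an element smaller than everything puts it in front
theorem pv_insert_front (x : String) (l : List String)
    (h : ∀ z ∈ l, pvBef x z = true) :
    PySem.List.insertBy pvBef x l = x :: l := by
  cases l with
  | nil => rfl
  | cons z l =>
    have : pvBef x z = true := h z (List.mem_cons_self ..)
    simp [PySem.List.insertBy, this]

-- insertBy preserves sortedness
theorem pv_insert_pairwise (x : String) (ys : List String)
    (h : ys.Pairwise (· ≤ ·)) :
    (PySem.List.insertBy pvBef x ys).Pairwise (· ≤ ·) := by
  induction ys with
  | nil => simp [PySem.List.insertBy]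
  | cons y ys ih =>
    rcases List.pairwise_cons.mp h with ⟨hy, hys⟩
    by_cases hb : pvBef x y = true
    · have hxy : x < y := by simpa [pvBef] using hb
      simp only [PySem.List.insertBy, hb, if_pos]
      refine List.pairwise_cons.mpr ⟨?_, h⟩
      intro z hz
      rcases List.mem_cons.mp hz with rfl | hz
      · exact le_of_lt hxy
      · exact le_of_lt (lt_of_lt_of_le hxy (hy z hz))
    · have hyx : y ≤ x := by
        have : ¬ x < y := by simpa [pvBef] using hb
        exact le_of_not_gt this
      simp only [PySem.List.insertBy, hb, if_neg, Bool.false_eq_true, not_false_iff]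
      refine List.pairwise_cons.mpr ⟨?_, ih hys⟩
      intro z hz
      rcases (PySem.List.mem_insertBy _ _ _ _).mp hz with rfl | hz
      · exact hyx
      · exact hy z hz

-- filtering commutes with inserting into a sorted list
theorem pv_filter_insert (p : String → Bool) (x : String) (ys : List String)
    (h : ys.Pairwise (· ≤ ·)) :
    (PySem.List.insertBy pvBef x ys).filter p
      = if p x then PySem.List.insertBy pvBef x (ys.filter p) else ys.filter p := by
  induction ys with
  | nil => cases hp : p x <;> simp [PySem.List.insertBy, List.filter, hp]
  | cons y ys ih =>
    rcases List.pairwise_cons.mp h with ⟨hy, hys⟩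
    by_cases hb : pvBef x y = true
    · have hxy : x < y := by simpa [pvBef] using hb
      simp only [PySem.List.insertBy, hb, if_pos]
      cases hp : p x with
      | false =>
        simp [List.filter_cons, hp]
      | true =>
        cases hpy : p y with
        | true => simp [List.filter_cons, hp, hpy, PySem.List.insertBy, hb]
        | false =>
          simp only [List.filter_cons, hp, hpy, if_pos, if_neg, Bool.false_eq_true,
            not_false_iff]
          rw [pv_insert_front]
          intro z hz
          have hzy : y ≤ z := hy z (List.mem_of_mem_filter hz)
          show decide (x < z) = true
          exact decide_eq_true (lt_of_lt_of_le hxy hzy)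
    · simp only [PySem.List.insertBy, hb, if_neg, Bool.false_eq_true, not_false_iff]
      cases hp : p x with
      | false =>
        cases hpy : p y <;>
          simp [List.filter_cons, hp, hpy, ih hys]
      | true =>
        cases hpy : p y with
        | true =>
          simp [List.filter_cons, hp, hpy, ih hys, PySem.List.insertBy, hb]
        | false =>
          simp [List.filter_cons, hp, hpy, ih hys]

-- filtering commutes with the whole insertion-sort fold
theorem pv_filter_foldl (p : String → Bool) (xs : List String) (acc : List String)
    (h : acc.Pairwise (· ≤ ·)) :
    (xs.foldl (fun acc x => PySem.List.insertBy pvBef x acc) acc).filter p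
      = (xs.filter p).foldl (fun acc x => PySem.List.insertBy pvBef x acc) (acc.filter p) := by
  induction xs generalizing acc with
  | nil => simp
  | cons x xs ih =>
    rw [List.foldl_cons, ih _ (pv_insert_pairwise x acc h),
      pv_filter_insert p x acc h, List.filter_cons]
    cases hp : p x <;> simp

-- sorting then filtering = filtering then sorting (identity key)
theorem pv_sorted_filter (p : String → Bool) (xs : List String) :
    (PySem.List.sorted xs (fun g => g)).filter p
      = PySem.List.sorted (xs.filter p) (fun g => g) := by
  have hb : (fun (a b : String) => decide ((fun g => g) a < (fun g => g) b)) = pvBef := rfl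
  rw [PySem.List.sorted_eq_foldl_insertBy, PySem.List.sorted_eq_foldl_insertBy, hb,
    pv_filter_foldl p xs [] List.Pairwise.nil]
  rfl

-- ===== VERDICT (by name: the statement is the Claim_ definition above) =====
theorem sort_groups_spec : Claim_equal_sort_groups := by
  intro groups _
  unfold Spec_sort_groups sort_groups sort_groups_alt
  rw [pv_loopA]
  simp only [List.nil_append]
  rw [← pv_sorted_filter, ← pv_sorted_filter, pv_filter_elif]
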